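-- pv_equiv track=rewrite | github.com/trevordbabcock/hunter | hunter_pkg/ui/element.py | middle_text
-- ===== SOURCE A (Python) =====
-- def middle_text(width, text):
--     left = True
--     while(len(text) < width-2):
--         if left:
--             text = " " + text
--             left = False
--         else: #right
--             text = text + " "
--             left = True
--
--     return "|" + text + "|"
-- ===== SOURCE B (Python) =====
-- def middle_text(width, text):
--     n = max(0, width - 2 - len(text))
--     return "|" + " " * ((n + 1) // 2) + text + " " * (n // 2) + "|"
-- ===== Notes on version B (the rewrite author's own statement) =====
-- stated objective: simpler
-- what changed: Replaces the alternating-flag while-loop that prepends/appends one space per iteration with a closed-form padding count split as ceil/floor (left favored), built in one concatenation.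
import Mathlib
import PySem

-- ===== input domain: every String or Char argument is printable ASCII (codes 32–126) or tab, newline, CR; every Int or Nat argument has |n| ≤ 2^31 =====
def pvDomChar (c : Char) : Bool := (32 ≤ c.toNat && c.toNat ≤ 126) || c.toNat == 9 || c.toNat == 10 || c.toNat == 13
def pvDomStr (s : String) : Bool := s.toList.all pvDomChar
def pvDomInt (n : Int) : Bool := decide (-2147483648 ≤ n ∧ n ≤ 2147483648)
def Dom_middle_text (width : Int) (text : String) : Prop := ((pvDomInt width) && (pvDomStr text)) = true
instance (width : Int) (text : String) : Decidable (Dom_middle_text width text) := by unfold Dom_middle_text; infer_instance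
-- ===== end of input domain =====

-- B replaces A's alternating prepend/append while-loop by a closed-form ceil/floor split
-- of the padding (left favored), built in one concatenation (objective: simpler).

-- ===== PORT A =====
-- A's while-loop: alternately prepend/append one space while len(text) < width-2.
def mtLoop (width : Int) (l : List Char) (left : Bool) : List Char :=
  if (l.length : Int) < width - 2 then
    if left then mtLoop width (' ' :: l) false
    else mtLoop width (l ++ [' ']) true
  else l
termination_by (width - 2 - l.length).toNat
decreasing_by
  · simp only [List.length_cons]; omega
  · simp only [List.length_append, List.length_cons, List.length_nil]; omega

def middle_text (width : Int) (text : String) : String :=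
  String.ofList ('|' :: (mtLoop width text.toList true ++ ['|']))

-- ===== PORT B =====
def middle_text_alt (width : Int) (text : String) : String :=
  let n : Int := max 0 (width - 2 - (text.toList.length : Int))
  String.ofList ('|' :: (List.replicate (PySem.Int.floordiv (n + 1) 2).toNat ' '
      ++ text.toList
      ++ List.replicate (PySem.Int.floordiv n 2).toNat ' ' ++ ['|']))

-- ===== PRECONDITION & SPEC =====
def Spec_middle_text (width : Int) (text : String) (out : String) : Prop := out = middle_text_alt width text
instance (width : Int) (text : String) (out : String) : Decidable (Spec_middle_text width text out) := by unfold Spec_middle_text; infer_instance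

-- ===== CLAIM (what is proved, stated in full; the proofs are below) =====
def Claim_equal_middle_text : Prop := ∀ (width : Int) (text : String), Dom_middle_text width text → Spec_middle_text width text (middle_text width text)

-- ===== LEMMAS AND PROOFS =====

-- The loop's closed form: with n = (width-2-|l|)⁺ spaces to add, the left side gets
-- ⌈n/2⌉ when the flag is true (left goes first) and ⌊n/2⌋ when it is false.
theorem mtLoop_closed (width : Int) :
    ∀ (k : Nat) (l : List Char) (left : Bool), (width - 2 - (l.length : Int)).toNat = k →
      mtLoop width l left =
        (if left then List.replicate ((k + 1) / 2) ' ' ++ l ++ List.replicate (k / 2) ' '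
         else List.replicate (k / 2) ' ' ++ l ++ List.replicate ((k + 1) / 2) ' ') := by
  intro k
  induction k with
  | zero =>
    intro l left hk
    rw [mtLoop]
    simp only [if_neg (by omega : ¬ ((l.length : Int) < width - 2))]
    cases left <;> simp
  | succ m ih =>
    intro l left hk
    rw [mtLoop]
    simp only [if_pos (by omega : (l.length : Int) < width - 2)]
    cases left with
    | true =>
      have h := ih (' ' :: l) false (by simp only [List.length_cons]; omega)
      simp only [if_neg (by simp : ¬ (false = true))] at h
      rw [if_pos rfl, h]
      have h2 : (m + 1 + 1) / 2 = m / 2 + 1 := by omega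
      rw [h2, List.replicate_succ']
      simp
    | false =>
      have h := ih (l ++ [' ']) true (by simp only [List.length_append, List.length_cons, List.length_nil]; omega) |>.trans (if_pos rfl)
      rw [if_neg (by simp : ¬ (false = true)), h]
      have h2 : (m + 1 + 1) / 2 = m / 2 + 1 := by omega
      rw [h2]
      simp [List.replicate_succ]

theorem middle_text_spec : Claim_equal_middle_text := by
  intro width text _
  unfold Spec_middle_text middle_text middle_text_alt
  set l := text.toList with hl
  set k : Nat := (width - 2 - (l.length : Int)).toNat with hk
  have hloop := mtLoop_closed width k l true rfl
  simp only [if_pos] at hloop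
  have hn : max 0 (width - 2 - (l.length : Int)) = (k : Int) := by omega
  rw [hloop]
  have h1 : PySem.Int.floordiv ((k : Int) + 1) 2 = (((k + 1) / 2 : Nat) : Int) := by
    exact_mod_cast PySem.Int.floordiv_natCast (k + 1) 2
  have h2 : PySem.Int.floordiv (k : Int) 2 = ((k / 2 : Nat) : Int) := by
    exact_mod_cast PySem.Int.floordiv_natCast k 2
  simp only [hn, h1, h2, Int.toNat_natCast]

-- ===== VERDICT (by name: the statement is the Claim_ definition above) =====
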